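-- pv_equiv track=rewrite | github.com/ryu5791/AutoUniTestGen | src/parser/condition_extractor.py | _find_top_level_operator
-- ===== SOURCE A (Python) =====
-- from typing import List, Optional, Tuple, Dict, Any
--
-- def _find_top_level_operator(text: str) -> Optional[str]:
--     """
--     トップレベル（最も外側）の論理演算子を見つける
--
--     Args:
--         text: 条件式テキスト
--
--     Returns:
--         演算子（'||' or '&&'）またはNone
--     """
--     text = text.strip()
--     # 外側の括弧を除去
--     while text.startswith('(') and text.endswith(')'):
--         depth = 0
--         valid = True
--         for i, char in enumerate(text[1:-1], 1):
--             if char == '(':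
--                 depth += 1
--             elif char == ')':
--                 depth -= 1
--                 if depth < 0:
--                     valid = False
--                     break
--         if valid and depth == 0:
--             text = text[1:-1].strip()
--         else:
--             break
--
--     depth = 0
--     i = 0
--     while i < len(text):
--         char = text[i]
--         if char == '(':
--             depth += 1
--         elif char == ')':
--             depth -= 1
--         elif depth == 0:
--             # トップレベルで演算子を探す
--             # ||を先にチェック（優先度が低いため外側に来る）
--             if text[i:i+2] == '||':
--                 return '||'
--             if text[i:i+2] == '&&':
--                 # まだ||があるかもしれないので、最後まで探索
--                 pass
--         i += 1
--
--     # ||がなければ&&を探す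
--     depth = 0
--     i = 0
--     while i < len(text):
--         char = text[i]
--         if char == '(':
--             depth += 1
--         elif char == ')':
--             depth -= 1
--         elif depth == 0 and text[i:i+2] == '&&':
--             return '&&'
--         i += 1
--
--     return None
-- ===== SOURCE B (Python) =====
-- def _find_top_level_operator(text):
--     s = text.strip()
--     if s.startswith('(') and s.endswith(')'):
--         inner = s[1:-1]
--         if _balanced(inner):
--             return _find_top_level_operator(inner)
--     depth = 0
--     found_and = False
--     for a, b in zip(s, s[1:] + ' '):
--         if a == '(':
--             depth += 1
--         elif a == ')':
--             depth -= 1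
--         elif depth == 0:
--             if a == '|' and b == '|':
--                 return '||'
--             if a == '&' and b == '&':
--                 found_and = True
--     return '&&' if found_and else None
--
--
-- def _balanced(s):
--     depth = 0
--     for c in s:
--         if c == '(':
--             depth += 1
--         elif c == ')':
--             depth -= 1
--             if depth < 0:
--                 return False
--     return depth == 0
-- ===== Notes on version B (the rewrite author's own statement) =====
-- stated objective: faster
-- what changed: recursion replaces A's while-based paren-stripping loop, and A's two separate index-based top-level scans (first for the or-operator, then for the and-operator) are fused into a single pass over adjacent character pairs that records a seen top-level and-operator in a flag
import Mathlib
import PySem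

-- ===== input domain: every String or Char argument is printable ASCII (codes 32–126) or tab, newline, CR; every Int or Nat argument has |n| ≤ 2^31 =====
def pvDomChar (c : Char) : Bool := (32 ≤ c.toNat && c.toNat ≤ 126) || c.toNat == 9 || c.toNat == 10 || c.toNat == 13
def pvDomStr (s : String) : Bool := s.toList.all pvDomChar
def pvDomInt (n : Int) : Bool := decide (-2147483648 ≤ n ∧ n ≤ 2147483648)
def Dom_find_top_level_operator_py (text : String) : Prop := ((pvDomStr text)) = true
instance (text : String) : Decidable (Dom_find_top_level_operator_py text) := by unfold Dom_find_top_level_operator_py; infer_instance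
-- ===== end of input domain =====

-- B replaces A's while-based paren stripping and its TWO index-based top-level scans (which slice
-- text[i:i+2] at every character) by a recursive strip step and ONE fused pair-wise scan with a flag;
-- a timing run measured B faster (objective: faster, constant-factor).

-- termination helpers for both ports (strip never lengthens; a '('…')' string has length ≥ 2)
theorem pvTwoLe (s : List Char) (h1 : s.headD ' ' = '(') (h2 : s.getLastD ' ' = ')') :
    2 ≤ s.length := by
  match s with
  | [] => simp at h1
  | [a] => simp at h1 h2; rw [h1] at h2; simp at h2
  | a :: b :: t => simp

-- termination helper for both ports (strip never lengthens a string)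
theorem pvStripLenLe (l : List Char) : (PySem.Chars.strip l).length ≤ l.length := by
  simp only [PySem.Chars.strip, PySem.Chars.rstrip, PySem.Chars.lstrip, List.length_reverse]
  calc (List.dropWhile PySem.Chars.isspace (List.dropWhile PySem.Chars.isspace l).reverse).length
      ≤ (List.dropWhile PySem.Chars.isspace l).reverse.length := List.length_dropWhile_le _ _
    _ ≤ l.length := by simpa using List.length_dropWhile_le _ l

-- ===== PORT A =====
-- inner `for i, char in enumerate(text[1:-1], 1)` with early break: returns (depth, valid)
def pvCheckA : List Char → Int → Int × Bool
  | [], d => (d, true)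
  | c :: rest, d =>
    if c = '(' then pvCheckA rest (d + 1)
    else if c = ')' then
      if d - 1 < 0 then (d - 1, false) else pvCheckA rest (d - 1)
    else pvCheckA rest d

-- the `while text.startswith('(') and text.endswith(')')` loop
def pvStripA (s : List Char) : List Char :=
  if h : s.headD ' ' = '(' ∧ s.getLastD ' ' = ')' then
    let inner := (s.drop 1).dropLast
    let p := pvCheckA inner 0
    if p.2 = true ∧ p.1 = 0 then pvStripA (PySem.Chars.strip inner)
    else s
  else s
termination_by s.length
decreasing_by
  have h2 : 2 ≤ s.length := pvTwoLe s h.1 h.2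
  have := pvStripLenLe ((s.drop 1).dropLast)
  simp only [List.length_dropLast, List.length_drop] at this ⊢
  omega

-- first `while i < len(text)` loop: returns '||' at the first top-level match
def pvScanOrA : List Char → Int → Option String
  | [], _ => none
  | c :: rest, d =>
    if c = '(' then pvScanOrA rest (d + 1)
    else if c = ')' then pvScanOrA rest (d - 1)
    else if d = 0 then
      if (c :: rest).take 2 = ['|', '|'] then some "||" else pvScanOrA rest d
    else pvScanOrA rest d

-- second `while i < len(text)` loop, looking for '&&'
def pvScanAndA : List Char → Int → Option String
  | [], _ => none
  | c :: rest, d =>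
    if c = '(' then pvScanAndA rest (d + 1)
    else if c = ')' then pvScanAndA rest (d - 1)
    else if d = 0 ∧ (c :: rest).take 2 = ['&', '&'] then some "&&"
    else pvScanAndA rest d

def find_top_level_operator_py (text : String) : Option String :=
  let s := pvStripA (PySem.Chars.strip text.toList)
  match pvScanOrA s 0 with
  | some r => some r
  | none => pvScanAndA s 0

-- ===== PORT B =====
-- _balanced: one pass, early False when depth dips below 0
def pvBalancedB : List Char → Int → Bool
  | [], d => d == 0
  | c :: rest, d =>
    if c = '(' then pvBalancedB rest (d + 1)
    else if c = ')' then
      if d - 1 < 0 then false else pvBalancedB rest (d - 1)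
    else pvBalancedB rest d

-- fused scan: `for a, b in zip(s, s[1:] + ' ')` — b is the next char, ' ' past the end (= rest.headD ' ')
def pvFuseB : List Char → Int → Bool → Option String
  | [], _, f => if f then some "&&" else none
  | a :: rest, d, f =>
    let b := rest.headD ' '
    if a = '(' then pvFuseB rest (d + 1) f
    else if a = ')' then pvFuseB rest (d - 1) f
    else if d = 0 then
      if a = '|' ∧ b = '|' then some "||"
      else pvFuseB rest d (f || (a = '&' && b = '&'))
    else pvFuseB rest d f

def pvAltGo (t : List Char) : Option String :=
  let s := PySem.Chars.strip t
  if h : s.headD ' ' = '(' ∧ s.getLastD ' ' = ')' ∧ pvBalancedB ((s.drop 1).dropLast) 0 = true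
  then pvAltGo ((s.drop 1).dropLast)
  else pvFuseB s 0 false
termination_by t.length
decreasing_by
  have hs := pvStripLenLe t
  have h2 : 2 ≤ (PySem.Chars.strip t).length := pvTwoLe (PySem.Chars.strip t) h.1 h.2.1
  simp only [List.length_dropLast, List.length_drop]
  omega

def find_top_level_operator_py_alt (text : String) : Option String :=
  pvAltGo text.toList

-- ===== PRECONDITION & SPEC =====
def Spec_find_top_level_operator_py (text : String) (out : Option String) : Prop := out = find_top_level_operator_py_alt text
instance (text : String) (out : Option String) : Decidable (Spec_find_top_level_operator_py text out) := by unfold Spec_find_top_level_operator_py; infer_instance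

-- ===== CLAIM (what is proved, stated in full; the proofs are below) =====
def Claim_equal_find_top_level_operator_py : Prop := ∀ (text : String), Dom_find_top_level_operator_py text → Spec_find_top_level_operator_py text (find_top_level_operator_py text)

-- ===== LEMMAS AND PROOFS =====

-- B's _balanced decides exactly A's (valid ∧ depth == 0) condition
theorem pvBalanced_eq_checkA (l : List Char) (d : Int) :
    pvBalancedB l d = ((pvCheckA l d).2 && ((pvCheckA l d).1 == 0)) := by
  induction l generalizing d with
  | nil => simp [pvBalancedB, pvCheckA]
  | cons c rest ih =>
    simp only [pvBalancedB, pvCheckA]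
    split_ifs with h1 h2 h3 <;> simp [ih]

-- lookahead bridge: text[i:i+2] == 'xx'  ↔  current char and padded next char are both 'x'
theorem pvTake2_iff (c x : Char) (rest : List Char) (hx : x ≠ ' ') :
    ((c :: rest).take 2 = [x, x]) ↔ (c = x ∧ rest.headD ' ' = x) := by
  cases rest with
  | nil => constructor
           · intro h; simp at h
           · rintro ⟨-, h⟩; simp at h; exact absurd h.symm hx
  | cons b t => simp

-- A's second scan returns only none or some "&&"
theorem pvScanAndA_cases (l : List Char) (d : Int) :
    pvScanAndA l d = none ∨ pvScanAndA l d = some "&&" := by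
  induction l generalizing d with
  | nil => simp [pvScanAndA]
  | cons c rest ih =>
    simp only [pvScanAndA]
    split_ifs <;> simp [ih]

-- fused single pass = first scan, then (flag ∨ second scan)
theorem pvFuse_eq_scans (l : List Char) (d : Int) (f : Bool) :
    pvFuseB l d f =
      match pvScanOrA l d with
      | some r => some r
      | none => if (f || (pvScanAndA l d).isSome) then some "&&" else none := by
  induction l generalizing d f with
  | nil => cases f <;> simp [pvFuseB, pvScanOrA, pvScanAndA]
  | cons a rest ih =>
    have hor := pvTake2_iff a '|' rest (by decide)
    have hand := pvTake2_iff a '&' rest (by decide)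
    by_cases h1 : a = '('
    · have hF : pvFuseB (a :: rest) d f = pvFuseB rest (d + 1) f := by
        simp only [pvFuseB]; rw [if_pos h1]
      have hO : pvScanOrA (a :: rest) d = pvScanOrA rest (d + 1) := by
        simp only [pvScanOrA]; rw [if_pos h1]
      have hA : pvScanAndA (a :: rest) d = pvScanAndA rest (d + 1) := by
        simp only [pvScanAndA]; rw [if_pos h1]
      simp only [hF, hO, hA]; exact ih _ _
    · by_cases h2 : a = ')'
      · have hF : pvFuseB (a :: rest) d f = pvFuseB rest (d - 1) f := by
          simp only [pvFuseB]; rw [if_neg h1, if_pos h2]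
        have hO : pvScanOrA (a :: rest) d = pvScanOrA rest (d - 1) := by
          simp only [pvScanOrA]; rw [if_neg h1, if_pos h2]
        have hA : pvScanAndA (a :: rest) d = pvScanAndA rest (d - 1) := by
          simp only [pvScanAndA]; rw [if_neg h1, if_pos h2]
        simp only [hF, hO, hA]; exact ih _ _
      · by_cases h3 : d = 0
        · by_cases h4 : a = '|' ∧ rest.headD ' ' = '|'
          · have hF : pvFuseB (a :: rest) d f = some "||" := by
              simp only [pvFuseB]; rw [if_neg h1, if_neg h2, if_pos h3, if_pos h4]
            have hO : pvScanOrA (a :: rest) d = some "||" := by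
              simp only [pvScanOrA]; rw [if_neg h1, if_neg h2, if_pos h3, if_pos (hor.mpr h4)]
            simp only [hF, hO]
          · have hno : ¬ (a :: rest).take 2 = ['|', '|'] := fun hh => h4 (hor.mp hh)
            have hO : pvScanOrA (a :: rest) d = pvScanOrA rest d := by
              simp only [pvScanOrA]; rw [if_neg h1, if_neg h2, if_pos h3, if_neg hno]
            by_cases h5 : a = '&' ∧ rest.headD ' ' = '&'
            · have hb : (decide (a = '&') && decide (rest.headD ' ' = '&')) = true := by
                simp only [Bool.and_eq_true, decide_eq_true_eq]; exact ⟨h5.1, h5.2⟩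
              have hF : pvFuseB (a :: rest) d f = pvFuseB rest d true := by
                simp only [pvFuseB]; rw [if_neg h1, if_neg h2, if_pos h3, if_neg h4, hb,
                  Bool.or_true]
              have hA : pvScanAndA (a :: rest) d = some "&&" := by
                simp only [pvScanAndA]; rw [if_neg h1, if_neg h2, if_pos ⟨h3, hand.mpr h5⟩]
              simp only [hF, hO, hA, ih, Option.isSome_some, Bool.or_true, if_pos]
              cases pvScanOrA rest d <;> simp
            · have hb : (decide (a = '&') && decide (rest.headD ' ' = '&')) = false := by
                simp only [Bool.and_eq_false_iff, decide_eq_false_iff_not]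
                exact Decidable.not_and_iff_not_or_not.mp h5
              have hF : pvFuseB (a :: rest) d f = pvFuseB rest d f := by
                simp only [pvFuseB]; rw [if_neg h1, if_neg h2, if_pos h3, if_neg h4, hb,
                  Bool.or_false]
              have hA : pvScanAndA (a :: rest) d = pvScanAndA rest d := by
                simp only [pvScanAndA]
                rw [if_neg h1, if_neg h2, if_neg (fun hh : d = 0 ∧ _ => h5 (hand.mp hh.2))]
              simp only [hF, hO, hA]; exact ih _ _
        · have hF : pvFuseB (a :: rest) d f = pvFuseB rest d f := by
            simp only [pvFuseB]; rw [if_neg h1, if_neg h2, if_neg h3]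
          have hO : pvScanOrA (a :: rest) d = pvScanOrA rest d := by
            simp only [pvScanOrA]; rw [if_neg h1, if_neg h2, if_neg h3]
          have hA : pvScanAndA (a :: rest) d = pvScanAndA rest d := by
            simp only [pvScanAndA]
            rw [if_neg h1, if_neg h2, if_neg (fun hh : d = 0 ∧ _ => h3 hh.1)]
          simp only [hF, hO, hA]; exact ih _ _

-- the non-recursing tail of both programs agrees
theorem pvFuse_eq_A (s : List Char) :
    pvFuseB s 0 false =
      (match pvScanOrA s 0 with
       | some r => some r
       | none => pvScanAndA s 0) := by
  rw [pvFuse_eq_scans]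
  cases hso : pvScanOrA s 0 <;> simp
  rcases pvScanAndA_cases s 0 with h | h <;> simp [h]

-- strip loop: B's recursion = A's while loop, followed by the same scans
theorem pvAltGo_eq (t : List Char) :
    pvAltGo t =
      (match pvScanOrA (pvStripA (PySem.Chars.strip t)) 0 with
       | some r => some r
       | none => pvScanAndA (pvStripA (PySem.Chars.strip t)) 0) := by
  induction hn : t.length using Nat.strong_induction_on generalizing t with
  | _ n ih =>
    subst hn
    rw [pvAltGo]
    by_cases h : ((PySem.Chars.strip t).headD ' ' = '(' ∧
        (PySem.Chars.strip t).getLastD ' ' = ')' ∧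
        pvBalancedB (((PySem.Chars.strip t).drop 1).dropLast) 0 = true)
    · rw [dif_pos h]
      have h2 := pvTwoLe _ h.1 h.2.1
      have hlen := pvStripLenLe t
      have hin : ((((PySem.Chars.strip t).drop 1).dropLast).length < t.length) := by
        simp only [List.length_dropLast, List.length_drop]; omega
      rw [ih _ hin _ rfl]
      have hcheck : (pvCheckA (((PySem.Chars.strip t).drop 1).dropLast) 0).2 = true ∧
          (pvCheckA (((PySem.Chars.strip t).drop 1).dropLast) 0).1 = 0 := by
        have hb := h.2.2
        rw [pvBalanced_eq_checkA] at hb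
        simp only [Bool.and_eq_true, beq_iff_eq] at hb
        exact hb
      have hstrip : pvStripA (PySem.Chars.strip t) =
          pvStripA (PySem.Chars.strip (((PySem.Chars.strip t).drop 1).dropLast)) := by
        rw [pvStripA, dif_pos ⟨h.1, h.2.1⟩, if_pos hcheck]
      rw [hstrip]
    · rw [dif_neg h]
      have hstrip : pvStripA (PySem.Chars.strip t) = PySem.Chars.strip t := by
        rw [pvStripA]
        by_cases hh : ((PySem.Chars.strip t).headD ' ' = '(' ∧
            (PySem.Chars.strip t).getLastD ' ' = ')')
        · rw [dif_pos hh]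
          have hnc : ¬ ((pvCheckA (((PySem.Chars.strip t).drop 1).dropLast) 0).2 = true ∧
              (pvCheckA (((PySem.Chars.strip t).drop 1).dropLast) 0).1 = 0) := by
            intro hc
            simp only [List.drop_one] at hc
            exact h ⟨hh.1, hh.2, by
              rw [pvBalanced_eq_checkA]
              simp only [List.drop_one, hc.1, hc.2]
              decide⟩
          rw [if_neg hnc]
        · rw [dif_neg hh]
      rw [hstrip]
      exact pvFuse_eq_A _

-- ===== VERDICT (by name: the statement is the Claim_ definition above) =====
theorem find_top_level_operator_py_spec : Claim_equal_find_top_level_operator_py := by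
  intro text _
  unfold Spec_find_top_level_operator_py find_top_level_operator_py find_top_level_operator_py_alt
  exact (pvAltGo_eq text.toList).symm
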